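-- pv_equiv track=rewrite | github.com/ozielmaxwell/python-Assignment | Maxwell_Oziel.py | choose_best_abbreviations_inner
-- ===== SOURCE A (Python) =====
-- def choose_best_abbreviations_inner(abbreviations):
--     """
--     Find the abbreviation with the lowest score for one name's set of abbreviations.
--     If multiple abbreviations have the same score, returns all (or none if no abbreviations provided).
--
--     Returns:
--     A list of abbreviations (usually of length 1, but sometimes 0 or 2+).
--     """
--     min_score = float('inf')
--     best_abbreviations = []
--
--     for abbreviation, score in abbreviations.items():
--         if score < min_score:
--             best_abbreviations = [abbreviation]
--             min_score = score
--         elif score == min_score: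
--             best_abbreviations.append(abbreviation)
--
--     return best_abbreviations
-- ===== SOURCE B (Python) =====
-- def choose_best_abbreviations_inner(abbreviations):
--     if not abbreviations:
--         return []
--     min_score = min(abbreviations.values())
--     return [abbr for abbr, score in abbreviations.items() if score == min_score]
-- ===== Notes on version B (the rewrite author's own statement) =====
-- stated objective: simpler
-- what changed: Replaces the fused single-pass loop that maintains a running minimum plus an accumulator (with reset-on-improvement) by a two-pass min-then-filter: compute min(values()) once, then one comprehension keeping the entries that attain it.
import Mathlib
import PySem

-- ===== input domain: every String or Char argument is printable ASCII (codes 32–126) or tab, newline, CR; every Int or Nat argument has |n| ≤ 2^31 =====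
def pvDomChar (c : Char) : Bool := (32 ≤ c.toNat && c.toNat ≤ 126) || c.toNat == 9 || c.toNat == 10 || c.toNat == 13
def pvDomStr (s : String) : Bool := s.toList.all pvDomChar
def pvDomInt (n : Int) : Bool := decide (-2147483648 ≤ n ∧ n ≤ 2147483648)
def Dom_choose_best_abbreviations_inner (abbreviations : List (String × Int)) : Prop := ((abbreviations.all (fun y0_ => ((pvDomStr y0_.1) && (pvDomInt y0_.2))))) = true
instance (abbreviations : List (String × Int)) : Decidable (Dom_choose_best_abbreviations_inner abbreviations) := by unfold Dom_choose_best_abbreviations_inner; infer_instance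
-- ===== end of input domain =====

-- B replaces A's fused running-minimum-with-reset loop by a two-pass min-then-filter (objective: simpler).

-- ===== PORT A =====
-- min_score = float('inf') is modelled by Option Int: none = inf (every score is < inf).
def choose_best_abbreviations_inner (abbreviations : List (String × Int)) : List String :=
  (abbreviations.foldl
    (fun st p =>
      match st.2 with
      | none => ([p.1], some p.2)
      | some m =>
        if p.2 < m then ([p.1], some p.2)
        else if p.2 = m then (st.1 ++ [p.1], st.2)
        else st)
    (([] : List String), (none : Option Int))).1

-- ===== PORT B =====
def choose_best_abbreviations_inner_alt (abbreviations : List (String × Int)) : List String :=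
  match PySem.List.min? (abbreviations.map Prod.snd) (fun x => x) with
  | none => []
  | some m => (abbreviations.filter (fun p => p.2 == m)).map Prod.fst

-- ===== PRECONDITION & SPEC =====
def Spec_choose_best_abbreviations_inner (abbreviations : List (String × Int)) (out : List String) : Prop := out = choose_best_abbreviations_inner_alt abbreviations
instance (abbreviations : List (String × Int)) (out : List String) : Decidable (Spec_choose_best_abbreviations_inner abbreviations out) := by unfold Spec_choose_best_abbreviations_inner; infer_instance

-- ===== CLAIM (what is proved, stated in full; the proofs are below) =====
def Claim_equal_choose_best_abbreviations_inner : Prop := ∀ (abbreviations : List (String × Int)), Dom_choose_best_abbreviations_inner abbreviations → Spec_choose_best_abbreviations_inner abbreviations (choose_best_abbreviations_inner abbreviations)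

-- ===== LEMMAS AND PROOFS =====

def pvStep (st : List String × Option Int) (p : String × Int) : List String × Option Int :=
  match st.2 with
  | none => ([p.1], some p.2)
  | some m =>
    if p.2 < m then ([p.1], some p.2)
    else if p.2 = m then (st.1 ++ [p.1], st.2)
    else st

theorem pvFoldMin_le (l : List (String × Int)) (m : Int) :
    l.foldl (fun x p => min x p.2) m ≤ m := by
  induction l generalizing m with
  | nil => simp
  | cons h t ih =>
    simp only [List.foldl_cons]
    exact le_trans (ih _) (min_le_left _ _)

-- invariant for A's loop once the running minimum is a real value
theorem pvFold_some (l : List (String × Int)) (acc : List String) (m : Int) :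
    l.foldl pvStep (acc, some m)
      = ((if l.foldl (fun x p => min x p.2) m = m then acc else [])
          ++ (l.filter (fun p => p.2 == l.foldl (fun x p => min x p.2) m)).map Prod.fst,
         some (l.foldl (fun x p => min x p.2) m)) := by
  induction l generalizing acc m with
  | nil => simp
  | cons h t ih =>
    simp only [List.foldl_cons]
    by_cases hlt : h.2 < m
    · rw [show pvStep (acc, some m) h = ([h.1], some h.2) by simp [pvStep, hlt]]
      rw [ih]
      have hmin : min m h.2 = h.2 := min_eq_right (le_of_lt hlt)
      have hM := pvFoldMin_le t h.2
      have hMne : t.foldl (fun x p => min x p.2) h.2 ≠ m := by omega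
      simp only [hmin]
      simp only [hMne, if_false, List.filter_cons]
      by_cases heq : t.foldl (fun x p => min x p.2) h.2 = h.2
      · simp [heq]
      · have : (h.2 == t.foldl (fun x p => min x p.2) h.2) = false := by
          simp; omega
        simp [this, heq]
    · by_cases heq : h.2 = m
      · rw [show pvStep (acc, some m) h = (acc ++ [h.1], some m) by simp [pvStep, heq]]
        rw [ih]
        have hmin : min m h.2 = m := by omega
        simp only [hmin]
        simp only [List.filter_cons]
        by_cases hMm : t.foldl (fun x p => min x p.2) m = m
        · have : (h.2 == t.foldl (fun x p => min x p.2) m) = true := by simp; omega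
          simp [hMm, heq]
        · have : (h.2 == t.foldl (fun x p => min x p.2) m) = false := by
            have := pvFoldMin_le t m; simp; omega
          simp only [this, Bool.false_eq_true, if_false]
          simp only [if_neg hMm]
      · rw [show pvStep (acc, some m) h = (acc, some m) by simp [pvStep, hlt, heq]]
        rw [ih]
        have hmin : min m h.2 = m := by omega
        simp only [hmin]
        have hM := pvFoldMin_le t m
        have : (h.2 == t.foldl (fun x p => min x p.2) m) = false := by simp; omega
        simp [this]

-- ===== VERDICT (by name: the statement is the Claim_ definition above) =====
theorem choose_best_abbreviations_inner_spec : Claim_equal_choose_best_abbreviations_inner := by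
  intro l _
  unfold Spec_choose_best_abbreviations_inner choose_best_abbreviations_inner choose_best_abbreviations_inner_alt
  cases l with
  | nil => simp [PySem.List.min?]
  | cons h t =>
    simp only [List.map_cons, PySem.List.min?_id_cons]
    have hfold : List.foldl
        (fun st p =>
          match st.2 with
          | none => ([p.1], some p.2)
          | some m =>
            if p.2 < m then ([p.1], some p.2)
            else if p.2 = m then (st.1 ++ [p.1], st.2)
            else st)
        (([] : List String), (none : Option Int)) (h :: t)
        = List.foldl pvStep (([h.1], some h.2)) t := by
      simp only [List.foldl_cons]
      rfl
    rw [hfold, pvFold_some]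
    have hmap : (t.map Prod.snd).foldl min h.2 = t.foldl (fun x p => min x p.2) h.2 := by
      rw [List.foldl_map]
    rw [hmap]
    have hM := pvFoldMin_le t h.2
    by_cases heq : t.foldl (fun x p => min x p.2) h.2 = h.2
    · simp [heq]
    · have : (h.2 == t.foldl (fun x p => min x p.2) h.2) = false := by simp; omega
      simp [this, heq]
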